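-- pv_equiv track=rewrite | github.com/ikim26/CS463 | ikim26_h1.py | augdentity
-- ===== SOURCE A (Python) =====
-- def augdentity(r,c):
-- 	matrix = []
-- 	for i in range(r):
-- 		temp = []
-- 		for j in range(c):
-- 			if(i == j):
-- 				temp.append(1)
-- 			else:
-- 				temp.append(0)
-- 		matrix.append(temp)
-- 	return matrix
-- ===== SOURCE B (Python) =====
-- def augdentity(r, c):
--     # Shift algorithm: start with [1,0,...,0] and derive each next row by
--     # shifting the previous row one step right (prepend 0, truncate to c).
--     matrix = []
--     if r <= 0:
--         return matrix
--     row = [1] + [0] * (c - 1) if c > 0 else []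
--     for _ in range(r):
--         matrix.append(row)
--         row = ([0] + row)[:c]
--     return matrix
-- ===== Notes on version B (the rewrite author's own statement) =====
-- stated objective: alternative
-- what changed: B builds the first row [1,0,...,0] once and derives each subsequent row by shifting the previous one right (prepend 0, truncate to c), instead of A's nested per-cell i==j branch.
import Mathlib
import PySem

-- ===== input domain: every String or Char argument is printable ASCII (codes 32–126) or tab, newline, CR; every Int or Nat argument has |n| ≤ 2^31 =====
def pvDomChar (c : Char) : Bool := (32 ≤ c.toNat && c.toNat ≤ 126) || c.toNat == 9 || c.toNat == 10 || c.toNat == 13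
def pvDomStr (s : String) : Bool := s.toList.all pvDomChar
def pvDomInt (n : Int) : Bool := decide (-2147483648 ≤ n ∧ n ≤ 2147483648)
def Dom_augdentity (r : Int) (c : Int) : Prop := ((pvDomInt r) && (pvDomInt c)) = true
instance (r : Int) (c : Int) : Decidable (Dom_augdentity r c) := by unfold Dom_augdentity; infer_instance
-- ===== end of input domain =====

-- B derives each row by shifting the previous row one step right (prepend 0, truncate to c),
-- instead of A's nested per-cell i==j branch; same cost, a different row-construction algorithm.

-- ===== PORT A =====
-- literal port of A: outer loop appends rows, inner loop appends 1 on the diagonal else 0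
def augdentity (r : Int) (c : Int) : List (List Int) :=
  (PySem.List.pyRange 0 r 1).foldl
    (fun matrix i =>
      matrix ++ [(PySem.List.pyRange 0 c 1).foldl
        (fun temp j => if i = j then temp ++ [1] else temp ++ [0]) []])
    []

-- ===== PORT B =====
-- literal port of B: early return [] if r<=0; row = [1]+[0]*(c-1) if c>0 else []; loop: append row; row = ([0]+row)[:c]
def augdentity_alt (r : Int) (c : Int) : List (List Int) :=
  if r ≤ 0 then [] else
  let row0 : List Int := if c > 0 then 1 :: List.replicate (c - 1).toNat 0 else []
  ((PySem.List.pyRange 0 r 1).foldl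
    (fun (st : List (List Int) × List Int) _ =>
      (st.1 ++ [st.2], PySem.List.slice ((0 : Int) :: st.2) none (some c)))
    ([], row0)).1

-- ===== PRECONDITION & SPEC =====
def Spec_augdentity (r : Int) (c : Int) (out : List (List Int)) : Prop := out = augdentity_alt r c
instance (r : Int) (c : Int) (out : List (List Int)) : Decidable (Spec_augdentity r c out) := by unfold Spec_augdentity; infer_instance

-- ===== CLAIM (what is proved, stated in full; the proofs are below) =====
def Claim_equal_augdentity : Prop := ∀ (r : Int) (c : Int), Dom_augdentity r c → Spec_augdentity r c (augdentity r c)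

-- ===== LEMMAS AND PROOFS =====

-- row i of the identity-like matrix, over Nat dimensions
def rowFun (i cn : Nat) : List Int :=
  (List.range cn).map (fun j => if i = j then (1 : Int) else 0)

-- the common value
def identMat (rn cn : Nat) : List (List Int) :=
  (List.range rn).map (fun i => rowFun i cn)

-- A computes identMat
lemma augdentity_eq_identMat (r c : Int) :
    augdentity r c = identMat r.toNat c.toNat := by
  unfold augdentity identMat rowFun
  simp only [PySem.List.foldl_append_singleton_eq_map, List.nil_append,
    PySem.List.pyRange_one, List.map_map]
  simp [Function.comp]
  intro a _
  have : (fun (temp : List Int) (j : Int) => if (a:Int) = j then temp ++ [1] else temp ++ [0])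
      = (fun temp j => temp ++ [if (a:Int) = j then (1 : Int) else 0]) := by
    funext temp j; split <;> rfl
  rw [this, List.foldl_map, PySem.List.foldl_append_singleton_eq_map]
  simp

-- B's initial row is rowFun 0
lemma row0_eq (c : Int) :
    (if c > 0 then 1 :: List.replicate (c - 1).toNat 0 else []) = rowFun 0 c.toNat := by
  unfold rowFun
  by_cases h : c > 0
  · simp only [h, if_pos]
    have hc : c.toNat = (c - 1).toNat + 1 := by omega
    rw [hc, List.range_succ_eq_map]
    simp only [List.map_cons, List.map_map]
    refine List.cons_eq_cons.mpr ⟨by simp, ?_⟩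
    symm
    rw [List.map_congr_left (g := fun _ => (0 : Int)) (fun x _ => by simp [Function.comp])]
    simp
  · have : c.toNat = 0 := by omega
    simp [h, this]

-- one shift step: ([0] + rowFun k)[:c] = rowFun (k+1)
lemma shift_row (c : Int) (k : Nat) :
    PySem.List.slice ((0 : Int) :: rowFun k c.toNat) none (some c) = rowFun (k + 1) c.toNat := by
  by_cases h : 0 ≤ c
  · rw [PySem.List.slice_to _ h]
    apply List.ext_getElem
    · simp [rowFun]
    · intro n h1 h2
      simp only [List.length_take, List.length_cons, rowFun, List.length_map,
        List.length_range] at h1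
      rw [List.getElem_take]
      rcases n with _ | m
      · simp [rowFun]
      · simp only [List.getElem_cons_succ, rowFun, List.getElem_map, List.getElem_range]
        exact if_congr (by omega) rfl rfl
  · obtain ⟨k', hk', rfl⟩ : ∃ k' : ℕ, 0 < k' ∧ c = -(k' : Int) :=
      ⟨(-c).toNat, by omega, by omega⟩
    rw [PySem.List.slice_to_neg_natCast _ _ hk']
    simp [rowFun, show ((-(k' : Int)).toNat = 0) by omega, show 1 - k' = 0 by omega]

-- fold invariant: after m iterations the matrix holds rows 0..m-1 and the carried row is rowFun m
lemma fold_invariant (c : Int) (m : Nat) :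
    (List.range m).foldl
      (fun (st : List (List Int) × List Int) _ =>
        (st.1 ++ [st.2], PySem.List.slice ((0 : Int) :: st.2) none (some c)))
      ([], rowFun 0 c.toNat)
    = ((List.range m).map (fun i => rowFun i c.toNat), rowFun m c.toNat) := by
  induction m with
  | zero => simp
  | succ k ih =>
    rw [List.range_succ, List.foldl_append, ih, List.foldl_cons, List.foldl_nil, shift_row]
    simp

-- B computes identMat too
lemma augdentity_alt_eq_identMat (r c : Int) :
    augdentity_alt r c = identMat r.toNat c.toNat := by
  unfold augdentity_alt identMat
  by_cases hr : r ≤ 0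
  · simp [hr, show r.toNat = 0 by omega]
  simp only [hr, if_neg, not_false_iff]
  simp only [row0_eq, PySem.List.pyRange_one, zero_add, sub_zero,
    List.foldl_map]
  rw [fold_invariant]

-- ===== VERDICT (by name: the statement is the Claim_ definition above) =====
theorem augdentity_spec : Claim_equal_augdentity := by
  intro r c _
  unfold Spec_augdentity
  rw [augdentity_eq_identMat, augdentity_alt_eq_identMat]
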